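-- pv_equiv track=rewrite | github.com/danile4140/algorithm | SearchAlgorithm/BinarySearch.py | b_search_2
-- ===== SOURCE A (Python) =====
-- def b_search_2(array, value):
--     """查找最后一个值等于给定值的元素位置"""
--     low = 0
--     high = len(array) - 1
--     index = -1
--     while low <= high:
--         mid = int((low + high) / 2)
--         if array[mid] == value:
--             index = mid
--             low = mid + 1
--         elif array[mid] > value:
--             high = mid - 1
--         else:
--             low = mid + 1
--     return index
-- ===== SOURCE B (Python) =====
-- def b_search_2(array, value):
--     """Last index whose element equals value in a sorted array, else -1."""
--     for i in reversed(range(len(array))):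
--         if array[i] == value:
--             return i
--     return -1
-- ===== Notes on version B (the rewrite author's own statement) =====
-- stated objective: simpler
-- what changed: B replaces A's index-tracking binary search with a single reverse linear scan that returns the first index from the right whose element equals value.
-- outside the precondition, e.g. on b_search_2([2, 1], 1): A returns -1, B returns 1
import Mathlib
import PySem

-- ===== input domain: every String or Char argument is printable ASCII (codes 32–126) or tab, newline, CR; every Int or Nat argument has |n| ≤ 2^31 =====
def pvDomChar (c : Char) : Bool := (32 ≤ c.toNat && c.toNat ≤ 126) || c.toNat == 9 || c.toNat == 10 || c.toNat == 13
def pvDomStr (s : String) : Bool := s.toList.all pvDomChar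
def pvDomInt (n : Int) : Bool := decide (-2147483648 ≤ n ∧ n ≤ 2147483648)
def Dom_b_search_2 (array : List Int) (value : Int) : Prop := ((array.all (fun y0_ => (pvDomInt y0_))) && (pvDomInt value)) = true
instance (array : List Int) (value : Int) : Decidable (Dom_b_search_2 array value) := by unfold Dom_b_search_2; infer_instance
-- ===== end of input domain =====

-- B finds the last index equal to `value` with a single reverse linear scan
-- instead of A's index-tracking binary search. Objective: simpler (not faster).

-- ===== PORT A =====
-- midpoint bounds for Python's int((low+high)/2) (= truncation toward zero); used for termination
theorem pvMidBounds {low high : Int} (h : low ≤ high) :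
    low ≤ PySem.Int.truncdiv (low + high) 2 ∧ PySem.Int.truncdiv (low + high) 2 ≤ high := by
  simp only [PySem.Int.truncdiv]
  rw [Int.tdiv_eq_ediv]
  split_ifs <;> simp [Int.sign] <;> omega

-- the while-loop of A, state (low, high, index)
def pvLoopA (array : List Int) (value low high index : Int) : Int :=
  if h : low ≤ high then
    -- mid = int((low + high) / 2): exact for |low+high| < 2^53 (PySem.Int.truncdiv)
    let mid := PySem.Int.truncdiv (low + high) 2
    match PySem.List.pyGet? array mid with
    | none => -2  -- unreachable on A's calls: mid ∈ [low, high] ⊆ [0, len); Python would raise IndexError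
    | some x =>
      if x = value then pvLoopA array value (mid + 1) high mid
      else if x > value then pvLoopA array value low (mid - 1) index
      else pvLoopA array value (mid + 1) high index
  else index
termination_by (high + 1 - low).toNat
decreasing_by
  · have := pvMidBounds h; omega
  · have := pvMidBounds h; omega
  · have := pvMidBounds h; omega

def b_search_2 (array : List Int) (value : Int) : Int :=
  pvLoopA array value 0 ((array.length : Int) - 1) (-1)

-- ===== PORT B =====
-- the for-loop of B with early return, over the index list reversed(range(len(array)));
-- array[i] for 0 ≤ i < len is exactly array.getD i 0
def pvScanB (array : List Int) (value : Int) : List Nat → Int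
  | [] => -1
  | i :: rest => if array.getD i 0 = value then (i : Int) else pvScanB array value rest

def b_search_2_alt (array : List Int) (value : Int) : Int :=
  pvScanB array value (List.range array.length).reverse

-- ===== PRECONDITION & SPEC =====
-- Pre_ admits every non-decreasing array (the documented domain of a binary search) and,
-- in addition, every array in which value does not occur (both sides return -1 there); it
-- excludes only unsorted arrays containing value, where A's probe-path result is an
-- accident of its implementation, e.g. A([2,1],1) = -1 while B returns 1.
def Pre_b_search_2 (array : List Int) (value : Int) : Prop :=
  List.Pairwise (· ≤ ·) array ∨ value ∉ array
instance (array : List Int) (value : Int) : Decidable (Pre_b_search_2 array value) := by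
  unfold Pre_b_search_2; infer_instance

def pvWitness_b_search_2 : List Int × Int := ([1, 2, 2, 3], 2)

def Spec_b_search_2 (array : List Int) (value : Int) (out : Int) : Prop := out = b_search_2_alt array value
instance (array : List Int) (value : Int) (out : Int) : Decidable (Spec_b_search_2 array value out) := by unfold Spec_b_search_2; infer_instance

-- ===== CLAIM (what is proved, stated in full; the proofs are below) =====
def Claim_equal_b_search_2 : Prop := ∀ (array : List Int) (value : Int), Dom_b_search_2 array value → Pre_b_search_2 array value → Spec_b_search_2 array value (b_search_2 array value)

-- ===== LEMMAS AND PROOFS =====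

-- "r is the last index of v in a (or -1 if absent)"
def pvLast (a : List Int) (v r : Int) : Prop :=
  (r = -1 ∧ ∀ i : Nat, i < a.length → a.getD i 0 ≠ v) ∨
  (∃ k : Nat, r = (k : Int) ∧ k < a.length ∧ a.getD k 0 = v ∧
    ∀ i : Nat, i < a.length → k < i → a.getD i 0 ≠ v)

theorem pvLast_unique {a : List Int} {v r1 r2 : Int}
    (h1 : pvLast a v r1) (h2 : pvLast a v r2) : r1 = r2 := by
  rcases h1 with ⟨e1, n1⟩ | ⟨k1, e1, hk1, hv1, t1⟩ <;>
    rcases h2 with ⟨e2, n2⟩ | ⟨k2, e2, hk2, hv2, t2⟩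
  · omega
  · exact absurd hv2 (n1 k2 hk2)
  · exact absurd hv1 (n2 k1 hk1)
  · rcases Nat.lt_trichotomy k1 k2 with h | h | h
    · exact absurd hv2 (t1 k2 hk2 h)
    · omega
    · exact absurd hv1 (t2 k1 hk1 h)

-- invariant proof for A's loop on a sorted array
theorem pvLoopA_last (a : List Int) (v : Int)
    (hs : ∀ i j : Nat, i < a.length → j < a.length → i ≤ j → a.getD i 0 ≤ a.getD j 0) :
    ∀ n low high index, (high + 1 - low).toNat = n → 0 ≤ low → high ≤ (a.length : Int) - 1 →
      index < low →
      (index = -1 ∨ ∃ k : Nat, index = (k : Int) ∧ k < a.length ∧ a.getD k 0 = v) →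
      (∀ i : Nat, i < a.length → a.getD i 0 = v → (i : Int) < low → (i : Int) ≤ index) →
      (∀ i : Nat, i < a.length → a.getD i 0 = v → (i : Int) < low ∨ (i : Int) ≤ high) →
      pvLast a v (pvLoopA a v low high index) := by
  intro n
  induction n using Nat.strong_induction_on with
  | _ n ih =>
  intro low high index hn h0 hhi hidx hJ2 hJ1 hJ3
  rw [pvLoopA]
  by_cases h : low ≤ high
  · rw [dif_pos h]
    obtain ⟨hm1, hm2⟩ := pvMidBounds h
    set mid := PySem.Int.truncdiv (low + high) 2 with hmiddef
    obtain ⟨m, hm⟩ : ∃ m : Nat, (m : Int) = mid := ⟨mid.toNat, by omega⟩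
    have hml : m < a.length := by omega
    have hlt1 : (high + 1 - (mid + 1)).toNat < n := by clear hJ2; omega
    have hlt2 : (mid - 1 + 1 - low).toNat < n := by clear hJ2; omega
    have h0' : (0:Int) ≤ mid + 1 := by omega
    have hhi2 : mid - 1 ≤ (a.length : Int) - 1 := by omega
    have hget : PySem.List.pyGet? a mid = some (a.getD m 0) := by
      rw [← hm, PySem.List.pyGet?_natCast]
      rw [List.getElem?_eq_getElem hml, List.getD_eq_getElem a 0 hml]
    show pvLast a v
      (match PySem.List.pyGet? a mid with
       | none => -2
       | some x =>
         if x = v then pvLoopA a v (mid + 1) high mid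
         else if x > v then pvLoopA a v low (mid - 1) index
         else pvLoopA a v (mid + 1) high index)
    rw [hget]
    show pvLast a v
      (if a.getD m 0 = v then pvLoopA a v (mid + 1) high mid
       else if a.getD m 0 > v then pvLoopA a v low (mid - 1) index
       else pvLoopA a v (mid + 1) high index)
    by_cases hv : a.getD m 0 = v
    · rw [if_pos hv]
      refine ih (high + 1 - (mid + 1)).toNat hlt1 (mid + 1) high mid rfl h0' hhi
        (by omega) (Or.inr ⟨m, hm.symm, hml, hv⟩) ?_ ?_
      · intro i hi hiv hlt
        by_cases hil : (i : Int) < low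
        · have := hJ1 i hi hiv hil; omega
        · omega
      · intro i hi hiv
        rcases hJ3 i hi hiv with hc | hc <;> omega
    · rw [if_neg hv]
      by_cases hgt : a.getD m 0 > v
      · rw [if_pos hgt]
        refine ih (mid - 1 + 1 - low).toNat hlt2 low (mid - 1) index rfl h0 hhi2
          hidx hJ2 hJ1 ?_
        intro i hi hiv
        rcases hJ3 i hi hiv with hc | hc
        · exact Or.inl hc
        · by_cases him : (i : Int) ≤ mid - 1
          · exact Or.inr him
          · exfalso
            have hle := hs m i hml hi (by omega)
            rw [hiv] at hle
            omega
      · rw [if_neg hgt]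
        refine ih (high + 1 - (mid + 1)).toNat hlt1 (mid + 1) high index rfl h0'
          hhi (by omega) hJ2 ?_ ?_
        · intro i hi hiv hlt
          by_cases hil : (i : Int) < low
          · exact hJ1 i hi hiv hil
          · exfalso
            have hle := hs i m hi hml (by omega)
            rw [hiv] at hle
            omega
        · intro i hi hiv
          rcases hJ3 i hi hiv with hc | hc <;> omega
  · rw [dif_neg h]
    rcases hJ2 with he | ⟨k, hk, hkl, hkv⟩
    · refine Or.inl ⟨he, ?_⟩
      intro i hi hiv
      have hlo : (i : Int) < low := by rcases hJ3 i hi hiv with hc | hc <;> omega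
      have := hJ1 i hi hiv hlo
      omega
    · refine Or.inr ⟨k, hk, hkl, hkv, ?_⟩
      intro i hi hki hiv
      have hlo : (i : Int) < low := by rcases hJ3 i hi hiv with hc | hc <;> omega
      have := hJ1 i hi hiv hlo
      omega

theorem pvA_last (a : List Int) (v : Int)
    (hs : ∀ i j : Nat, i < a.length → j < a.length → i ≤ j → a.getD i 0 ≤ a.getD j 0) :
    pvLast a v (b_search_2 a v) := by
  unfold b_search_2
  refine pvLoopA_last a v hs ((a.length : Int) - 1 + 1 - 0).toNat 0 ((a.length : Int) - 1) (-1)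
    rfl (by omega) (by omega) (by omega) (Or.inl rfl) ?_ ?_
  · intro i _ _ hlt
    omega
  · intro i hi _
    omega

theorem pvSorted_getD {a : List Int} (hp : List.Pairwise (· ≤ ·) a) :
    ∀ i j : Nat, i < a.length → j < a.length → i ≤ j → a.getD i 0 ≤ a.getD j 0 := by
  intro i j hi hj hij
  rw [List.getD_eq_getElem a 0 hi, List.getD_eq_getElem a 0 hj]
  rcases Nat.lt_or_eq_of_le hij with h | h
  · exact List.pairwise_iff_getElem.mp hp i j hi hj h
  · subst h; exact le_refl _

-- B's scan over reversed(range n): last index below n with a.getD = v, else -1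
theorem pvScanB_spec (a : List Int) (v : Int) : ∀ n : Nat,
    (pvScanB a v (List.range n).reverse = -1 ∧ ∀ i : Nat, i < n → a.getD i 0 ≠ v) ∨
    (∃ k : Nat, pvScanB a v (List.range n).reverse = (k : Int) ∧ k < n ∧ a.getD k 0 = v ∧
      ∀ i : Nat, i < n → k < i → a.getD i 0 ≠ v) := by
  intro n
  induction n with
  | zero => exact Or.inl ⟨rfl, by omega⟩
  | succ m ih =>
    have hr : (List.range (m + 1)).reverse = m :: (List.range m).reverse := by
      rw [List.range_succ, List.reverse_append]; rfl
    rw [hr]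
    show _ ∨ _
    by_cases hv : a.getD m 0 = v
    · right
      exact ⟨m, by simp only [pvScanB]; rw [if_pos hv], by omega, hv, by omega⟩
    · have hstep : pvScanB a v (m :: (List.range m).reverse) = pvScanB a v (List.range m).reverse := by
        simp only [pvScanB]; rw [if_neg hv]
      rw [hstep]
      rcases ih with ⟨he, hnone⟩ | ⟨k, hk, hkm, hkv, htail⟩
      · refine Or.inl ⟨he, ?_⟩
        intro i hi
        rcases Nat.lt_or_eq_of_le (Nat.le_of_lt_succ hi) with h | h
        · exact hnone i h
        · exact h ▸ hv
      · refine Or.inr ⟨k, hk, by omega, hkv, ?_⟩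
        intro i hi hki
        rcases Nat.lt_or_eq_of_le (Nat.le_of_lt_succ hi) with h | h
        · exact htail i h hki
        · exact h ▸ hv

theorem pvB_last (a : List Int) (v : Int) : pvLast a v (b_search_2_alt a v) := by
  unfold b_search_2_alt
  rcases pvScanB_spec a v a.length with ⟨he, hnone⟩ | ⟨k, hk, hkm, hkv, htail⟩
  · exact Or.inl ⟨he, hnone⟩
  · exact Or.inr ⟨k, hk, hkm, hkv, htail⟩

-- if value never occurs, A's loop never updates index and returns it unchanged
theorem pvLoopA_notMem (a : List Int) (v : Int) (hnm : v ∉ a) :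
    ∀ n low high index, (high + 1 - low).toNat = n → 0 ≤ low → high ≤ (a.length : Int) - 1 →
      pvLoopA a v low high index = index := by
  intro n
  induction n using Nat.strong_induction_on with
  | _ n ih =>
  intro low high index hn h0 hhi
  rw [pvLoopA]
  by_cases h : low ≤ high
  · rw [dif_pos h]
    obtain ⟨hm1, hm2⟩ := pvMidBounds h
    set mid := PySem.Int.truncdiv (low + high) 2 with hmiddef
    obtain ⟨m, hm⟩ : ∃ m : Nat, (m : Int) = mid := ⟨mid.toNat, by omega⟩
    have hml : m < a.length := by omega
    have hget : PySem.List.pyGet? a mid = some (a.getD m 0) := by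
      rw [← hm, PySem.List.pyGet?_natCast]
      rw [List.getElem?_eq_getElem hml, List.getD_eq_getElem a 0 hml]
    have hlt1 : (high + 1 - (mid + 1)).toNat < n := by omega
    have hlt2 : (mid - 1 + 1 - low).toNat < n := by omega
    show (match PySem.List.pyGet? a mid with
       | none => (-2 : Int)
       | some x =>
         if x = v then pvLoopA a v (mid + 1) high mid
         else if x > v then pvLoopA a v low (mid - 1) index
         else pvLoopA a v (mid + 1) high index) = index
    rw [hget]
    show (if a.getD m 0 = v then pvLoopA a v (mid + 1) high mid
       else if a.getD m 0 > v then pvLoopA a v low (mid - 1) index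
       else pvLoopA a v (mid + 1) high index) = index
    have hv : a.getD m 0 ≠ v := by
      intro hv
      apply hnm
      rw [List.getD_eq_getElem a 0 hml] at hv
      exact hv ▸ List.getElem_mem hml
    rw [if_neg hv]
    by_cases hgt : a.getD m 0 > v
    · rw [if_pos hgt]
      exact ih (mid - 1 + 1 - low).toNat hlt2 low (mid - 1) index rfl h0 (by omega)
    · rw [if_neg hgt]
      exact ih (high + 1 - (mid + 1)).toNat hlt1 (mid + 1) high index rfl (by omega) hhi
  · rw [dif_neg h]

theorem pvA_notMem (a : List Int) (v : Int) (hnm : v ∉ a) : b_search_2 a v = -1 := by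
  unfold b_search_2
  exact pvLoopA_notMem a v hnm ((a.length : Int) - 1 + 1 - 0).toNat 0 ((a.length : Int) - 1)
    (-1) rfl (by omega) (by omega)

theorem pvB_notMem (a : List Int) (v : Int) (hnm : v ∉ a) : b_search_2_alt a v = -1 := by
  rcases pvB_last a v with ⟨he, _⟩ | ⟨k, _, hkm, hkv, _⟩
  · exact he
  · exfalso
    apply hnm
    rw [List.getD_eq_getElem a 0 hkm] at hkv
    exact hkv ▸ List.getElem_mem hkm

-- ===== VERDICT (by name: the statement is the Claim_ definition above) =====
theorem b_search_2_spec : Claim_equal_b_search_2 := by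
  intro array value _ hpre
  unfold Spec_b_search_2
  rcases hpre with hsor | hnm
  · exact pvLast_unique (pvA_last array value (pvSorted_getD hsor)) (pvB_last array value)
  · rw [pvA_notMem array value hnm, pvB_notMem array value hnm]
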